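-- pv_equiv track=rewrite | github.com/Math-Vov13/Scrape.AI | server/read_doc/Levenshtein.py | folder_path
-- ===== SOURCE A (Python) =====
-- def folder_path(list_path):
--     dict_path={}
--     value=[]
--     last_key="/".join(list_path[0].split("/")[:-1])
--
--     for i in list_path:
--         key="/".join(i.split("/")[:-1])
--         if last_key!=key:
--             dict_path[last_key]=value
--             value=[]
--
--         value.append(i.rsplit("/")[-1])
--         last_key=key
--
--     dict_path[last_key]=value
--     return dict_path
-- ===== SOURCE B (Python) =====
-- def folder_path(list_path):
--     # recursive run-splitting: peel off the leading run of paths sharing a parent,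
--     # recurse on the remainder, merge the dicts
--     head = "/".join(list_path[0].split("/")[:-1])
--     n = 1
--     while n < len(list_path) and "/".join(list_path[n].split("/")[:-1]) == head:
--         n += 1
--     group = {head: [p.rsplit("/")[-1] for p in list_path[:n]]}
--     if n < len(list_path):
--         group.update(folder_path(list_path[n:]))
--     return group
-- ===== Notes on version B (the rewrite author's own statement) =====
-- stated objective: alternative
-- what changed: B replaces A's single streaming pass with last_key sentinel state and deferred flush by a recursive run-splitting: it scans off the leading run of paths sharing one parent, builds that one-entry group dict, recurses on the remaining slice, and merges the recursive dict into the group.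
import Mathlib
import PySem

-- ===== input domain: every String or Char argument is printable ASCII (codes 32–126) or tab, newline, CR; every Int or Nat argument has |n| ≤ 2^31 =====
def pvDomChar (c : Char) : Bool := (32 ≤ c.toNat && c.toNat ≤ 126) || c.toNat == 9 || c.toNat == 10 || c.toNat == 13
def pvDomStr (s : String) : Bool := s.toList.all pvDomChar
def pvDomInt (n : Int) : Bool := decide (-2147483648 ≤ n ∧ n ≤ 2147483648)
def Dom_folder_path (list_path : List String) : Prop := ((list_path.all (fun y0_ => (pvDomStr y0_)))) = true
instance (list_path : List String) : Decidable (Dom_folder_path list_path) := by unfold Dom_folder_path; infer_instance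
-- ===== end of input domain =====

-- ===== PORT A =====
-- B replaces A's streaming pass (last_key sentinel + deferred flush) by recursive
-- run-splitting with a dict merge; objective: alternative decomposition (same cost).
-- Both Pythons raise IndexError on [] (list_path[0]); Pre_ excludes only that input.

-- Shared text helpers: both Pythons contain the identical expressions
-- '"/".join(p.split("/")[:-1])' and 'p.rsplit("/")[-1]'.
-- split? is `some` because the separator "/" is nonempty; pyGet? at -1 is `some`
-- because str.split always returns a nonempty list — the .getD defaults are unreachable.
def pvParent (p : String) : String :=
  PySem.Str.join "/" (PySem.List.slice ((PySem.Str.split? p "/").getD []) none (some (-1)))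

def pvBase (p : String) : String :=
  (PySem.List.pyGet? ((PySem.Str.split? p "/").getD []) (-1)).getD ""

-- A's loop body: state (dict_path, value, last_key)
def pvStepA (st : PySem.Dict String (List String) × List String × String) (i : String) :
    PySem.Dict String (List String) × List String × String :=
  let key := pvParent i
  let st1 := if st.2.2 ≠ key then (st.1.insert st.2.2 st.2.1, ([] : List String), key) else st
  (st1.1, st1.2.1 ++ [pvBase i], key)

def folder_path (list_path : List String) : List (String × List String) :=
  match list_path with
  | [] => []  -- Python raises IndexError on list_path[0]; excluded by Pre_folder_path
  | p0 :: _ =>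
    let st := list_path.foldl pvStepA (PySem.Dict.empty, ([] : List String), pvParent p0)
    ((st.1.insert st.2.2 st.2.1)).items

-- ===== PORT B =====
-- Source B's while-loop computes n = length of the leading run sharing head's parent;
-- list_path[:n] is p0 :: takeWhile, list_path[n:] is dropWhile — an exact transcription
-- of the scan-then-slice. group.update(tail) iterates the recursive dict's items,
-- inserting each (overwrite keeps position), i.e. a foldl of insert.
def folder_path_alt (list_path : List String) : List (String × List String) :=
  match list_path with
  | [] => []  -- Python raises IndexError on list_path[0]; excluded by Pre_folder_path
  | p0 :: ps =>
    let head := pvParent p0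
    let run := ps.takeWhile (fun p => pvParent p == head)
    let rest := ps.dropWhile (fun p => pvParent p == head)
    let group := PySem.Dict.ofList [(head, (p0 :: run).map pvBase)]
    let merged := if rest.isEmpty then group
      else (folder_path_alt rest).foldl (fun d kv => d.insert kv.1 kv.2) group
    merged.items
termination_by list_path.length
decreasing_by
  simp only [List.length_cons]
  have := List.length_dropWhile_le (fun p => pvParent p == pvParent p0) ps
  omega

-- ===== PRECONDITION & SPEC =====
-- Pre_ excludes only the empty list, on which both Pythons raise IndexError (list_path[0]).
def Pre_folder_path (list_path : List String) : Prop := list_path ≠ []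
instance (list_path : List String) : Decidable (Pre_folder_path list_path) := by
  unfold Pre_folder_path; infer_instance

def pvWitness_folder_path : List String := ["docs/a.txt", "docs/b.txt", "src/m.py"]

def Spec_folder_path (list_path : List String) (out : List (String × List String)) : Prop :=
  out = folder_path_alt list_path
instance (list_path : List String) (out : List (String × List String)) :
    Decidable (Spec_folder_path list_path out) := by unfold Spec_folder_path; infer_instance

-- ===== CLAIM (what is proved, stated in full; the proofs are below) =====
def Claim_equal_folder_path : Prop := ∀ (list_path : List String), Dom_folder_path list_path →
  Pre_folder_path list_path → Spec_folder_path list_path (folder_path list_path)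

-- ===== LEMMAS AND PROOFS =====

-- abbreviation used throughout the proofs: one dict-insert step of a merge loop
def pvIns (d : PySem.Dict String (List String)) (kv : String × List String) :
    PySem.Dict String (List String) := d.insert kv.1 kv.2

-- the abstract run list both programs realize: (parent, basenames) per adjacent run
def pvPairs (k : String) (value : List String) (ps : List String) :
    List (String × List String) :=
  let run := ps.takeWhile (fun p => pvParent p == k)
  match h : ps.dropWhile (fun p => pvParent p == k) with
  | [] => [(k, value ++ run.map pvBase)]
  | q :: qs => (k, value ++ run.map pvBase) :: pvPairs (pvParent q) [pvBase q] qs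
termination_by ps.length
decreasing_by
  have h1 := List.length_dropWhile_le (fun p => pvParent p == k) ps
  rw [h] at h1
  simp at h1
  omega

-- A absorbs a whole matching run into `value` without touching the dict
theorem pvAbsorb (ps : List String) : ∀ (d : PySem.Dict String (List String))
    (value : List String) (k : String),
    ps.foldl pvStepA (d, value, k)
      = (ps.dropWhile (fun p => pvParent p == k)).foldl pvStepA
          (d, value ++ (ps.takeWhile (fun p => pvParent p == k)).map pvBase, k) := by
  induction ps with
  | nil => intro d value k; simp
  | cons p ps ih =>
    intro d value k
    by_cases h : pvParent p = k
    · have hstep : pvStepA (d, value, k) p = (d, value ++ [pvBase p], k) := by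
        simp [pvStepA, h]
      simp only [List.foldl_cons, hstep, List.takeWhile_cons, List.dropWhile_cons, h,
        beq_self_eq_true, if_true]
      rw [ih]
      simp
    · simp only [List.takeWhile_cons, List.dropWhile_cons, beq_iff_eq, h, if_false]
      simp

-- a replacement map at key k fixes a list whose keys avoid k
theorem pvReplFix (ls : List (String × List String)) (k : String) (v : List String)
    (h : k ∉ ls.map Prod.fst) :
    ls.map (fun p => if (p.1 == k) = true then (k, v) else p) = ls := by
  induction ls with
  | nil => rfl
  | cons p ls ih =>
    simp only [List.map_cons, List.mem_cons, not_or] at h ⊢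
    rw [ih h.2]
    have hp : ¬ p.1 = k := fun hh => h.1 hh.symm
    simp [hp]

-- insert commutes with insert at a key already present (overwrite is in place)
theorem pvInsComm (d : PySem.Dict String (List String)) (k k1 : String)
    (v w : List String) (hc : d.contains k = true) (hne : k1 ≠ k) :
    (d.insert k1 w).insert k v = (d.insert k v).insert k1 w := by
  apply PySem.Dict.ext
  have hck : (d.insert k1 w).contains k = true := by
    rw [PySem.Dict.contains_insert]; simp [hc]
  rw [PySem.Dict.items_insert_of_contains _ v hck]
  by_cases h1 : d.contains k1 = true
  · rw [PySem.Dict.items_insert_of_contains d w h1,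
      PySem.Dict.items_insert_of_contains _ w
        (by rw [PySem.Dict.contains_insert]; simp [h1]),
      PySem.Dict.items_insert_of_contains d v hc,
      List.map_map, List.map_map]
    apply List.map_congr_left
    intro p _
    by_cases hp1 : p.1 = k1 <;> by_cases hpk : p.1 = k <;>
      simp [Function.comp, hp1, hpk, hne, Ne.symm hne]
  · have h1' : d.contains k1 = false := by simpa using h1
    have h1'' : (d.insert k v).contains k1 = false := by
      rw [PySem.Dict.contains_insert]; simp [h1', hne]
    rw [PySem.Dict.items_insert_of_not_contains d w h1',
      PySem.Dict.items_insert_of_not_contains _ w h1'',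
      PySem.Dict.items_insert_of_contains d v hc,
      List.map_append]
    simp [hne]

-- pulling a final overwrite of k inside a fold whose keys avoid k
theorem pvInsFold (xs : List (String × List String)) :
    ∀ (d : PySem.Dict String (List String)) (k : String) (v : List String),
    d.contains k = true → k ∉ xs.map Prod.fst →
    (xs.foldl pvIns d).insert k v = xs.foldl pvIns (d.insert k v) := by
  induction xs with
  | nil => intro d k v _ _; rfl
  | cons x xs ih =>
    intro d k v hc hk
    simp only [List.map_cons, List.mem_cons, not_or] at hk
    have hx : x.1 ≠ k := fun hh => hk.1 hh.symm
    have hc' : (d.insert x.1 x.2).contains k = true := by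
      rw [PySem.Dict.contains_insert]; simp [hc]
    simp only [List.foldl_cons]
    rw [ih (pvIns d x) k v hc' hk.2]
    show xs.foldl pvIns ((d.insert x.1 x.2).insert k v) = xs.foldl pvIns ((d.insert k v).insert x.1 x.2)
    rw [pvInsComm d k x.1 v x.2 hc hx]

-- merging the items of (e.insert k v) = merging e's items, then inserting k
theorem pvMergeInsert (e d : PySem.Dict String (List String)) (k : String)
    (v : List String) (hnd : e.keys.Nodup) :
    ((e.insert k v).items).foldl pvIns d = (e.items.foldl pvIns d).insert k v := by
  by_cases hc : e.contains k = true
  · -- k present: items are e.items with the one entry at k replaced in place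
    have hkmem : k ∈ e.items.map Prod.fst := by
      have h0 := (PySem.Dict.contains_iff_mem_keys e k).mp hc
      simpa [PySem.Dict.keys] using h0
    obtain ⟨⟨pk, pv⟩, hp, hpk⟩ := List.mem_map.mp hkmem
    simp only at hpk
    subst hpk
    obtain ⟨ys, zs, hsplit⟩ := List.append_of_mem hp
    have hnd' : (ys.map Prod.fst ++ pk :: zs.map Prod.fst).Nodup := by
      have h0 : (e.items.map Prod.fst).Nodup := by simpa [PySem.Dict.keys] using hnd
      simpa [hsplit] using h0
    have hnd2 := List.nodup_append.mp hnd'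
    have hys : pk ∉ ys.map Prod.fst := fun hmem => hnd2.2.2 pk hmem pk (by simp) rfl
    have hzs : pk ∉ zs.map Prod.fst := (List.nodup_cons.mp hnd2.2.1).1
    rw [PySem.Dict.items_insert_of_contains e v hc, hsplit, List.map_append, List.map_cons]
    simp only [beq_self_eq_true, if_true]
    rw [pvReplFix ys pk v hys, pvReplFix zs pk v hzs]
    simp only [List.foldl_append, List.foldl_cons]
    show zs.foldl pvIns ((ys.foldl pvIns d).insert pk v)
      = (zs.foldl pvIns ((ys.foldl pvIns d).insert pk pv)).insert pk v
    rw [pvInsFold zs ((ys.foldl pvIns d).insert pk pv) pk v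
      (PySem.Dict.contains_insert_self _ _ _) hzs,
      PySem.Dict.insert_insert_self]
  · have hc' : e.contains k = false := by simpa using hc
    rw [PySem.Dict.items_insert_of_not_contains e v hc', List.foldl_append]
    rfl

-- folding a dict built from xs into d = folding xs into d directly
theorem pvMergeFold (xs : List (String × List String)) :
    ∀ (e : PySem.Dict String (List String)) (d : PySem.Dict String (List String)),
    e.keys.Nodup →
    ((xs.foldl pvIns e).items).foldl pvIns d = xs.foldl pvIns (e.items.foldl pvIns d) := by
  induction xs with
  | nil => intro e d _; rfl
  | cons x xs ih =>
    intro e d hnd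
    simp only [List.foldl_cons]
    rw [ih (pvIns e x) d (PySem.Dict.nodup_keys_insert e x.1 x.2 hnd)]
    show xs.foldl pvIns (((e.insert x.1 x.2).items).foldl pvIns d)
      = xs.foldl pvIns ((e.items.foldl pvIns d).insert x.1 x.2)
    rw [pvMergeInsert e d x.1 x.2 hnd]

-- A's result, flushed, is the fold of the abstract run list
theorem pvFlushA (n : Nat) : ∀ (ps : List String), ps.length ≤ n →
    ∀ (d : PySem.Dict String (List String)) (value : List String) (k : String),
    (let st := ps.foldl pvStepA (d, value, k); st.1.insert st.2.2 st.2.1)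
      = (pvPairs k value ps).foldl pvIns d := by
  induction n with
  | zero =>
    intro ps hlen d value k
    have hps : ps = [] := List.eq_nil_of_length_eq_zero (Nat.le_zero.mp hlen)
    subst hps
    simp [pvPairs, pvIns]
  | succ n ih =>
    intro ps hlen d value k
    simp only
    rw [pvAbsorb]
    rw [pvPairs.eq_def]
    cases hdrop : ps.dropWhile (fun p => pvParent p == k) with
    | nil => simp [pvIns]
    | cons q qs =>
      have hq : ¬ (pvParent q == k) = true := by
        have := List.head_dropWhile_not (fun p => pvParent p == k)
          (l := ps) (by rw [hdrop]; exact List.cons_ne_nil q qs)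
        simpa [hdrop] using this
      have hq' : pvParent q ≠ k := by simpa using hq
      have hlen' : qs.length ≤ n := by
        have h1 := List.length_dropWhile_le (fun p => pvParent p == k) ps
        rw [hdrop] at h1
        simp only [List.length_cons] at h1
        omega
      have hstep : pvStepA (d, value ++ (ps.takeWhile (fun p => pvParent p == k)).map pvBase, k) q
          = (d.insert k (value ++ (ps.takeWhile (fun p => pvParent p == k)).map pvBase),
             [pvBase q], pvParent q) := by
        simp [pvStepA, Ne.symm hq']
      simp only [List.foldl_cons, hstep]
      have := ih qs hlen' (d.insert k (value ++ (ps.takeWhile (fun p => pvParent p == k)).map pvBase))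
        [pvBase q] (pvParent q)
      simpa [pvIns] using this

-- B's result is the fold of the abstract run list from the empty dict
theorem pvAltEq (n : Nat) : ∀ (p0 : String) (ps : List String), ps.length ≤ n →
    folder_path_alt (p0 :: ps)
      = ((pvPairs (pvParent p0) [pvBase p0] ps).foldl pvIns PySem.Dict.empty).items := by
  induction n with
  | zero =>
    intro p0 ps hlen
    have hps : ps = [] := List.eq_nil_of_length_eq_zero (Nat.le_zero.mp hlen)
    subst hps
    simp [folder_path_alt, pvPairs, pvIns, PySem.Dict.ofList, PySem.Dict.update]
  | succ n ih =>
    intro p0 ps hlen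
    rw [folder_path_alt.eq_def, pvPairs.eq_def]
    cases hdrop : ps.dropWhile (fun p => pvParent p == pvParent p0) with
    | nil => simp [hdrop, pvIns, PySem.Dict.ofList, PySem.Dict.update]
    | cons q qs =>
      have hlen' : qs.length ≤ n := by
        have h1 := List.length_dropWhile_le (fun p => pvParent p == pvParent p0) ps
        rw [hdrop] at h1
        simp only [List.length_cons] at h1
        omega
      simp only [hdrop, List.isEmpty_cons, Bool.false_eq_true, if_false, List.foldl_cons]
      rw [ih q qs hlen']
      simp only [show (fun (d : PySem.Dict String (List String)) (kv : String × List String) =>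
        d.insert kv.1 kv.2) = pvIns from rfl]
      rw [pvMergeFold (pvPairs (pvParent q) [pvBase q] qs) PySem.Dict.empty _
        PySem.Dict.nodup_keys_empty]
      simp [pvIns, PySem.Dict.ofList, PySem.Dict.update, List.map_cons, PySem.Dict.empty]

-- ===== VERDICT (by name: the statement is the Claim_ definition above) =====
theorem folder_path_spec : Claim_equal_folder_path := by
  intro list_path _ hpre
  unfold Spec_folder_path
  match list_path with
  | [] => exact absurd rfl hpre
  | p0 :: ps =>
    show folder_path (p0 :: ps) = folder_path_alt (p0 :: ps)
    have hA := pvFlushA ps.length ps le_rfl PySem.Dict.empty [pvBase p0] (pvParent p0)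
    have hB := pvAltEq ps.length p0 ps le_rfl
    have hstep0 : pvStepA (PySem.Dict.empty, ([] : List String), pvParent p0) p0
        = (PySem.Dict.empty, [pvBase p0], pvParent p0) := by
      simp [pvStepA]
    simp only [folder_path, List.foldl_cons, hstep0]
    rw [hB, ← hA]
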